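-- pv_equiv track=rewrite | github.com/rudolfKischer/comp321-assignment-solutions | assignment7/breakingBad.py | does_it_wrk
-- ===== SOURCE A (Python) =====
-- def does_it_wrk(outfut, pairs):
--     # Juts gona lookie for bad combies here
--     for i in range(len(outfut)):
--         for j in range(i+1, len(outfut)):
--             combo1 = (outfut[i], outfut[j])
--             combo2 = (outfut[j], outfut[i])
--             if combo1 in pairs or combo2 in pairs:
--                 return False
--     return True
-- ===== SOURCE B (Python) =====
-- def does_it_wrk(outfut, pairs):
--     # Count occurrences once, then drive the check from the forbidden pairs.
--     cnt = {}
--     for x in outfut: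
--         cnt[x] = cnt.get(x, 0) + 1
--     for a, b in pairs:
--         if a == b:
--             if cnt.get(a, 0) >= 2:
--                 return False
--         elif cnt.get(a, 0) > 0 and cnt.get(b, 0) > 0:
--             return False
--     return True
-- ===== Notes on version B (the rewrite author's own statement) =====
-- stated objective: faster
-- what changed: Replaces A's nested scan over all index pairs of outfut (membership-testing each combination in pairs) with one counting pass over outfut followed by a single loop over pairs checking endpoint counts.
import Mathlib
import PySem

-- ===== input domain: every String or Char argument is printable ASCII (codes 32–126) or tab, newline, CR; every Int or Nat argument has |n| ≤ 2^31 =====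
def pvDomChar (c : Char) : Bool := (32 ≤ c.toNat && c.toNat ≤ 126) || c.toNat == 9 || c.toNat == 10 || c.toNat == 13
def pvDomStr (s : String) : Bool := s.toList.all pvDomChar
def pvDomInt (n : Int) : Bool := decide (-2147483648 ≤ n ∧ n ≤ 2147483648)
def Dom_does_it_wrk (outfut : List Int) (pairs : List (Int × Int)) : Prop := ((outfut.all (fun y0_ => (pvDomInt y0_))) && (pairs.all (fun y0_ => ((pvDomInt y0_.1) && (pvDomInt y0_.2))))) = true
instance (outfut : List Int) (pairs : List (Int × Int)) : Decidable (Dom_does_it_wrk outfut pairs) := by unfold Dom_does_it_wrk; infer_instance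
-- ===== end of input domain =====

-- B replaces A's nested scan over index pairs of outfut by one counting pass over
-- outfut plus a single loop over pairs (objective: faster, O(n+m) vs O(n^2*m)).

-- ===== PORT A =====
-- inner 'for j in range(i+1, len(outfut))': returns true on the first forbidden combo
-- (indices produced by range are in bounds, so pyGetD with default 0 is exact)
def pvAFindJ (outfut : List Int) (pairs : List (Int × Int)) (oi : Int) : List Int → Bool
  | [] => false
  | j :: js =>
    let oj := PySem.List.pyGetD outfut j 0
    if pairs.contains (oi, oj) || pairs.contains (oj, oi) then true
    else pvAFindJ outfut pairs oi js

-- outer 'for i in range(len(outfut))'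
def pvAFindI (outfut : List Int) (pairs : List (Int × Int)) : List Int → Bool
  | [] => false
  | i :: is =>
    let oi := PySem.List.pyGetD outfut i 0
    if pvAFindJ outfut pairs oi (PySem.List.pyRange (i + 1) outfut.length 1) then true
    else pvAFindI outfut pairs is

def does_it_wrk (outfut : List Int) (pairs : List (Int × Int)) : Bool :=
  !(pvAFindI outfut pairs (PySem.List.pyRange 0 outfut.length 1))

-- ===== PORT B =====
-- 'for a, b in pairs' with the count table cnt
def pvBLoop (cnt : PySem.Dict Int Int) : List (Int × Int) → Bool
  | [] => true
  | (a, b) :: rest =>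
    if a == b then
      if 2 ≤ cnt.getD a 0 then false else pvBLoop cnt rest
    else if (0 < cnt.getD a 0 && 0 < cnt.getD b 0) then false
    else pvBLoop cnt rest

def does_it_wrk_alt (outfut : List Int) (pairs : List (Int × Int)) : Bool :=
  let cnt := outfut.foldl (fun d x => d.insert x (d.getD x 0 + 1)) PySem.Dict.empty
  pvBLoop cnt pairs

-- ===== PRECONDITION & SPEC =====
def Spec_does_it_wrk (outfut : List Int) (pairs : List (Int × Int)) (out : Bool) : Prop := out = does_it_wrk_alt outfut pairs
instance (outfut : List Int) (pairs : List (Int × Int)) (out : Bool) : Decidable (Spec_does_it_wrk outfut pairs out) := by unfold Spec_does_it_wrk; infer_instance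

-- ===== CLAIM (what is proved, stated in full; the proofs are below) =====
def Claim_equal_does_it_wrk : Prop := ∀ (outfut : List Int) (pairs : List (Int × Int)), Dom_does_it_wrk outfut pairs → Spec_does_it_wrk outfut pairs (does_it_wrk outfut pairs)

-- ===== LEMMAS AND PROOFS =====

-- structural version of A's search: for each head x, scan the tail for a hit with x
def pvGFind (pairs : List (Int × Int)) : List Int → Bool
  | [] => false
  | x :: rest =>
    rest.any (fun y => pairs.contains (x, y) || pairs.contains (y, x)) || pvGFind pairs rest

-- B's per-pair test, phrased over the raw list (Int-valued counts)
def pvActive (o : List Int) (q : Int × Int) : Bool :=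
  if q.1 == q.2 then decide (2 ≤ (o.count q.1 : Int))
  else decide (0 < (o.count q.1 : Int)) && decide (0 < (o.count q.2 : Int))

lemma pvAFindJ_eq_any (o : List Int) (p : List (Int × Int)) (oi : Int) (js : List Int) :
    pvAFindJ o p oi js
      = js.any (fun j => p.contains (oi, PySem.List.pyGetD o j 0)
                        || p.contains (PySem.List.pyGetD o j 0, oi)) := by
  induction js with
  | nil => rfl
  | cons j js ih =>
    simp only [pvAFindJ, List.any_cons, ih]
    cases hc : (p.contains (oi, PySem.List.pyGetD o j 0)
                || p.contains (PySem.List.pyGetD o j 0, oi)) <;> simp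

lemma pvRange_map_pyGetD (o : List Int) :
    ∀ m (k : Nat), m = o.length - k →
      (PySem.List.pyRange (k : Int) (o.length : Int) 1).map (fun j => PySem.List.pyGetD o j 0)
        = o.drop k := by
  intro m
  induction m with
  | zero =>
    intro k hk
    have hle : o.length ≤ k := by omega
    rw [PySem.List.pyRange_one_eq_nil (by exact_mod_cast hle)]
    simp [List.drop_eq_nil_iff.mpr hle]
  | succ m ih =>
    intro k hk
    have hlt : k < o.length := by omega
    rw [PySem.List.pyRange_one_cons (by exact_mod_cast hlt)]
    have hcast : (k : Int) + 1 = ((k + 1 : Nat) : Int) := by push_cast; ring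
    rw [List.map_cons, hcast, ih (k + 1) (by omega)]
    have hget : PySem.List.pyGetD o (k : Int) 0 = o[k] := by
      rw [PySem.List.pyGetD_natCast]
      exact List.getD_eq_getElem o 0 hlt
    rw [hget, List.drop_eq_getElem_cons hlt]

lemma pvAFindI_eq_gfind (o : List Int) (p : List (Int × Int)) :
    ∀ m (k : Nat), m = o.length - k →
      pvAFindI o p (PySem.List.pyRange (k : Int) (o.length : Int) 1) = pvGFind p (o.drop k) := by
  intro m
  induction m with
  | zero =>
    intro k hk
    have hle : o.length ≤ k := by omega
    rw [PySem.List.pyRange_one_eq_nil (by exact_mod_cast hle)]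
    simp [pvAFindI, pvGFind, List.drop_eq_nil_iff.mpr hle]
  | succ m ih =>
    intro k hk
    have hlt : k < o.length := by omega
    rw [PySem.List.pyRange_one_cons (by exact_mod_cast hlt)]
    have hget : PySem.List.pyGetD o (k : Int) 0 = o[k] := by
      rw [PySem.List.pyGetD_natCast]
      exact List.getD_eq_getElem o 0 hlt
    have hcast : (k : Int) + 1 = ((k + 1 : Nat) : Int) := by push_cast; ring
    have hinner :
        pvAFindJ o p o[k] (PySem.List.pyRange ((k : Int) + 1) (o.length : Int) 1)
          = (o.drop (k + 1)).any (fun y => p.contains (o[k], y) || p.contains (y, o[k])) := by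
      rw [pvAFindJ_eq_any, hcast,
        ← pvRange_map_pyGetD o m (k + 1) (by omega), List.any_map]
      rfl
    simp only [pvAFindI, hget, hinner, List.drop_eq_getElem_cons hlt, pvGFind]
    cases hc : ((o.drop (k + 1)).any (fun y => p.contains (o[k], y) || p.contains (y, o[k])))
    · rw [if_neg (by simp), hcast, ih (k + 1) (by omega)]
      simp
    · simp

lemma pvGFind_cons_iff (p : List (Int × Int)) (x : Int) (rest : List Int) :
    (∃ q ∈ p, pvActive (x :: rest) q = true)
      ↔ (∃ y ∈ rest, (x, y) ∈ p ∨ (y, x) ∈ p) ∨ (∃ q ∈ p, pvActive rest q = true) := by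
  constructor
  · rintro ⟨⟨a, b⟩, hq, hact⟩
    by_cases hab : a = b
    · subst hab
      simp [pvActive] at hact
      have hcca : (x :: rest).count a = rest.count a + if (x == a) = true then 1 else 0 :=
        List.count_cons
      by_cases hxa : x = a
      · subst hxa
        have hcs : (x :: rest).count x = rest.count x + 1 := List.count_cons_self
        have hr : 0 < rest.count x := by omega
        exact Or.inl ⟨x, List.count_pos_iff.mp hr, Or.inl hq⟩
      · have hxa' : (x == a) = false := by simp [hxa]
        have hcs : (x :: rest).count a = rest.count a := by
          rw [hxa'] at hcca
          simpa using hcca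
        have hr : 2 ≤ rest.count a := by omega
        refine Or.inr ⟨(a, a), hq, ?_⟩
        simp [pvActive]
        omega
    · simp [pvActive, hab] at hact
      obtain ⟨ha, hb⟩ := hact
      by_cases har : a ∈ rest
      · by_cases hbr : b ∈ rest
        · refine Or.inr ⟨(a, b), hq, ?_⟩
          simp [pvActive, hab]
          exact ⟨har, hbr⟩
        · have hbx : b = x := by tauto
          subst hbx
          exact Or.inl ⟨a, har, Or.inr hq⟩
      · have hax : a = x := by tauto
        subst hax
        have hbr : b ∈ rest := by tauto
        exact Or.inl ⟨b, hbr, Or.inl hq⟩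
  · rintro (⟨y, hy, hp⟩ | ⟨⟨a, b⟩, hq, hact⟩)
    · by_cases hxy : x = y
      · subst hxy
        refine ⟨(x, x), by tauto, ?_⟩
        have h1 : (x :: rest).count x = rest.count x + 1 := List.count_cons_self
        have h2 : 0 < rest.count x := List.count_pos_iff.mpr hy
        simp [pvActive]
        omega
      · rcases hp with h | h
        · exact ⟨(x, y), h, by simp [pvActive, hxy, hy]⟩
        · exact ⟨(y, x), h, by simp [pvActive, Ne.symm hxy, hy]⟩
    · refine ⟨(a, b), hq, ?_⟩
      have h1 : (x :: rest).count a = rest.count a + if (x == a) = true then 1 else 0 :=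
        List.count_cons
      have h1' : rest.count a ≤ (x :: rest).count a := by split at h1 <;> omega
      by_cases hab : a = b
      · subst hab
        simp [pvActive] at hact ⊢
        omega
      · simp [pvActive, hab] at hact ⊢
        tauto

lemma pvGFind_eq_any (p : List (Int × Int)) (o : List Int) :
    pvGFind p o = p.any (pvActive o) := by
  induction o with
  | nil =>
    simp only [pvGFind]
    rw [eq_comm, List.any_eq_false]
    intro q hq
    simp [pvActive]
  | cons x rest ih =>
    simp only [pvGFind, ih]
    rw [Bool.eq_iff_iff]
    simp only [Bool.or_eq_true, List.any_eq_true, Bool.or_eq_true, List.contains_iff_mem]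
    rw [pvGFind_cons_iff]

lemma pvBLoop_eq_not_any (o : List Int) (p : List (Int × Int)) :
    pvBLoop (o.foldl (fun d x => d.insert x (d.getD x 0 + 1)) PySem.Dict.empty) p
      = !(p.any (pvActive o)) := by
  have hcnt : ∀ v : Int,
      (o.foldl (fun d x => d.insert x (d.getD x 0 + 1)) PySem.Dict.empty).getD v 0
        = (o.count v : Int) := by
    intro v
    rw [PySem.Dict.getD_foldl_insert_add_one]
    simp
  induction p with
  | nil => simp [pvBLoop]
  | cons q rest ih =>
    obtain ⟨a, b⟩ := q
    have hA : pvActive o (a, b)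
        = (if (a == b) = true then decide (2 ≤ (o.count a : Int))
           else decide (0 < (o.count a : Int)) && decide (0 < (o.count b : Int))) := rfl
    simp only [pvBLoop, List.any_cons, hcnt, hA]
    cases hab : (a == b)
    · simp only [Bool.false_eq_true, if_false]
      cases hX : (decide (0 < (o.count a : Int)) && decide (0 < (o.count b : Int)))
      · simp [ih]
      · simp
    · simp only [if_true]
      by_cases h2 : 2 ≤ (o.count a : Int)
      · rw [if_pos h2]
        simp [h2]
      · rw [if_neg h2, ih]
        simp [h2]

-- ===== VERDICT (by name: the statement is the Claim_ definition above) =====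
theorem does_it_wrk_spec : Claim_equal_does_it_wrk := by
  intro o p _
  show does_it_wrk o p = does_it_wrk_alt o p
  have hA : does_it_wrk o p = !(pvGFind p o) := by
    have h0 := pvAFindI_eq_gfind o p (o.length - 0) 0 rfl
    simp only [Nat.cast_zero, List.drop_zero] at h0
    simp [does_it_wrk, h0]
  rw [hA, pvGFind_eq_any]
  simp only [does_it_wrk_alt]
  rw [pvBLoop_eq_not_any]
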